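-- pv_equiv track=rewrite | github.com/sydleither/spatial_egt | analysis/correlation_func.py | count_manhattan_pairs
-- ===== SOURCE A (Python) =====
-- def count_manhattan_pairs(n, m, r):
--     total_pairs = 0
--     # Iterate over all possible dx values (horizontal separation)
--     for dx in range(r + 1):
--         # dy is determined by the equation dx + dy = r
--         dy = r - dx
--         # Number of valid rows and columns for each (dx, dy)
--         valid_rows = max(0, n - dy)  # Number of rows that can support vertical separation dy
--         valid_columns = max(0, m - dx)  # Number of columns that can support horizontal separation dx
--         # Multiply valid rows and columns to get the number of pairs for this (dx, dy)
--         total_pairs += valid_rows * valid_columns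
--         # If dx != 0 and dy != 0, count reverse direction pairs only once
--         if dx != 0 and dy != 0:
--             total_pairs += valid_rows * valid_columns
--     return total_pairs//2
-- ===== SOURCE B (Python) =====
-- def count_manhattan_pairs(n, m, r):
--     if r < 0:
--         return 0
--     # closed-form sum of max(0, a+dx)*max(0, b-dx) for dx in [0, k)
--     a, b = n - r, m
--     lo = max(0, 1 - a)
--     hi = min(r, b - 1)
--     if hi < lo:
--         f = 0
--     else:
--         t = lambda x: x * (x + 1) // 2
--         q = lambda x: x * (x + 1) * (2 * x + 1) // 6
--         s1 = t(hi) - t(lo - 1)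
--         s2 = q(hi) - q(lo - 1)
--         f = a * b * (hi - lo + 1) + (b - a) * s1 - s2
--     if r == 0:
--         total = f
--     else:
--         total = 2 * f - max(0, n - r) * max(0, m) - max(0, n) * max(0, m - r)
--     return total // 2
-- ===== Notes on version B (the rewrite author's own statement) =====
-- stated objective: faster
-- what changed: Replaced the O(r) loop over dx with a closed-form evaluation: the nonzero-term interval [lo,hi] of dx is computed directly and the quadratic summand is summed via triangular/pyramidal number formulas.
import Mathlib
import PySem

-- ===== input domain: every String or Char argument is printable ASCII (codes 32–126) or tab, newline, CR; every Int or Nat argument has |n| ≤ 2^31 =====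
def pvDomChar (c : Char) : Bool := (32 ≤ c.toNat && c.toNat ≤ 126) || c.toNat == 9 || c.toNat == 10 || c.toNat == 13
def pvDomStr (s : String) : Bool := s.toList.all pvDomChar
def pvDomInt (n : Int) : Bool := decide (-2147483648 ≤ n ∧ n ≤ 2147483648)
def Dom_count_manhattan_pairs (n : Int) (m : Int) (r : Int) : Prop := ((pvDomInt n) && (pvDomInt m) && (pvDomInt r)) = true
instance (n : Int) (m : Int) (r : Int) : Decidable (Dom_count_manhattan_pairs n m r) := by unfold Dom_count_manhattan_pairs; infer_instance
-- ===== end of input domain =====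

-- ===== PORT A =====
-- B replaces A's O(r) loop over dx with a closed-form polynomial evaluation (objective: faster).
def count_manhattan_pairs (n : Int) (m : Int) (r : Int) : Int :=
  PySem.Int.floordiv
    ((PySem.List.pyRange 0 (r + 1) 1).foldl
      (fun total_pairs dx =>
        let dy := r - dx
        let valid_rows := max 0 (n - dy)
        let valid_columns := max 0 (m - dx)
        let total_pairs := total_pairs + valid_rows * valid_columns
        if dx ≠ 0 ∧ dy ≠ 0 then total_pairs + valid_rows * valid_columns else total_pairs)
      0) 2

-- ===== PORT B =====
-- triangular number x*(x+1)//2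
def pvTri (x : Int) : Int := PySem.Int.floordiv (x * (x + 1)) 2
-- square pyramidal number x*(x+1)*(2x+1)//6
def pvPyr (x : Int) : Int := PySem.Int.floordiv (x * (x + 1) * (2 * x + 1)) 6

def count_manhattan_pairs_alt (n : Int) (m : Int) (r : Int) : Int :=
  if r < 0 then 0
  else
    let a := n - r
    let b := m
    let lo := max 0 (1 - a)
    let hi := min r (b - 1)
    let f :=
      if hi < lo then 0
      else
        let s1 := pvTri hi - pvTri (lo - 1)
        let s2 := pvPyr hi - pvPyr (lo - 1)
        a * b * (hi - lo + 1) + (b - a) * s1 - s2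
    let total :=
      if r = 0 then f
      else 2 * f - max 0 (n - r) * max 0 m - max 0 n * max 0 (m - r)
    PySem.Int.floordiv total 2

-- ===== PRECONDITION & SPEC =====
def Spec_count_manhattan_pairs (n : Int) (m : Int) (r : Int) (out : Int) : Prop := out = count_manhattan_pairs_alt n m r
instance (n : Int) (m : Int) (r : Int) (out : Int) : Decidable (Spec_count_manhattan_pairs n m r out) := by unfold Spec_count_manhattan_pairs; infer_instance

-- ===== CLAIM (what is proved, stated in full; the proofs are below) =====
def Claim_equal_count_manhattan_pairs : Prop := ∀ (n : Int) (m : Int) (r : Int), Dom_count_manhattan_pairs n m r → Spec_count_manhattan_pairs n m r (count_manhattan_pairs n m r)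

-- ===== LEMMAS AND PROOFS =====

-- the per-dx summand of A's loop
def pvV (n m r dx : Int) : Int := max 0 (n - (r - dx)) * max 0 (m - dx)

-- B's closed form, parametrised by the number k of dx values summed (dx ∈ [0, k))
def pvSegG (a b : Int) (k : Nat) : Int :=
  let lo := max 0 (1 - a)
  let hi := min ((k : Int) - 1) (b - 1)
  if hi < lo then 0
  else a * b * (hi - lo + 1) + (b - a) * (pvTri hi - pvTri (lo - 1)) - (pvPyr hi - pvPyr (lo - 1))

lemma pvTri_exact (x : Int) : 2 * pvTri x = x * (x + 1) := by
  unfold pvTri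
  rw [PySem.Int.floordiv_eq_ediv_of_pos (by norm_num)]
  have h : (2 : Int) ∣ x * (x + 1) := (Int.even_mul_succ_self x).two_dvd
  exact Int.mul_ediv_cancel' h

lemma pvPyr_exact (x : Int) : 6 * pvPyr x = x * (x + 1) * (2 * x + 1) := by
  have hall : ∀ y : ZMod 6, y * (y + 1) * (2 * y + 1) = 0 := by decide
  have hdvd : (6 : Int) ∣ x * (x + 1) * (2 * x + 1) := by
    have hz : ((x * (x + 1) * (2 * x + 1) : Int) : ZMod 6) = 0 := by
      push_cast
      exact hall (x : ZMod 6)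
    exact (ZMod.intCast_zmod_eq_zero_iff_dvd _ 6).mp hz
  unfold pvPyr
  rw [PySem.Int.floordiv_eq_ediv_of_pos (by norm_num)]
  exact Int.mul_ediv_cancel' hdvd

lemma pvTri_step (k : Int) : pvTri k - pvTri (k - 1) = k := by
  have h1 := pvTri_exact k
  have h2 := pvTri_exact (k - 1)
  have h3 : k * (k + 1) - (k - 1) * (k - 1 + 1) = 2 * k := by ring
  linarith

lemma pvPyr_step (k : Int) : pvPyr k - pvPyr (k - 1) = k * k := by
  have h1 := pvPyr_exact k
  have h2 := pvPyr_exact (k - 1)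
  have h6 : 6 * (pvPyr k - pvPyr (k - 1)) = 6 * (k * k) := by linear_combination h1 - h2
  have h3 : pvPyr k - pvPyr (k - 1) = k * k := by
    generalize pvPyr k - pvPyr (k - 1) = p at h6 ⊢
    generalize k * k = s at h6 ⊢
    omega
  exact h3

lemma pvSegG_sum (a b : Int) : ∀ k : Nat,
    pvSegG a b k = ((List.range k).map (fun i : Nat => max 0 (a + (i : Int)) * max 0 (b - (i : Int)))).sum := by
  intro k
  induction k with
  | zero =>
    simp only [List.range_zero, List.map_nil, List.sum_nil, pvSegG]
    rw [if_pos (by omega)]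
  | succ k ih =>
    rw [List.range_succ, List.map_append, List.sum_append, ← ih]
    simp only [List.map_cons, List.map_nil, List.sum_cons, List.sum_nil, add_zero]
    simp only [pvSegG, Nat.cast_succ]
    have hk0 : (0 : Int) ≤ (k : Int) := by positivity
    by_cases hb : b ≤ (k : Int)
    · -- new term is zero and hi is unchanged
      have h1 : min ((k : Int) + 1 - 1) (b - 1) = min ((k : Int) - 1) (b - 1) := by omega
      have h2 : max 0 (b - (k : Int)) = 0 := by omega
      rw [h1, h2, mul_zero, add_zero]
    · push_neg at hb
      by_cases ha : a + (k : Int) ≤ 0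
      · -- term zero; both closed forms empty
        have h1 : min ((k : Int) + 1 - 1) (b - 1) < max 0 (1 - a) := by omega
        have h2 : min ((k : Int) - 1) (b - 1) < max 0 (1 - a) := by omega
        have h3 : max 0 (a + (k : Int)) = 0 := by omega
        rw [if_pos h1, if_pos h2, h3, zero_mul, add_zero]
      · push_neg at ha
        have hlo : max 0 (1 - a) ≤ (k : Int) := by omega
        have hhi1 : min ((k : Int) + 1 - 1) (b - 1) = (k : Int) := by omega
        have hterm : max 0 (a + (k : Int)) * max 0 (b - (k : Int)) = (a + (k : Int)) * (b - (k : Int)) := by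
          have e1 : max 0 (a + (k : Int)) = a + (k : Int) := by omega
          have e2 : max 0 (b - (k : Int)) = b - (k : Int) := by omega
          rw [e1, e2]
        rw [hhi1, hterm, if_neg (by omega)]
        set lo := max 0 (1 - a) with hlodef
        have ht := pvTri_step (k : Int)
        have hp := pvPyr_step (k : Int)
        by_cases hke : (k : Int) = lo
        · -- previous range empty
          have h2 : min ((k : Int) - 1) (b - 1) < lo := by omega
          rw [if_pos h2]
          have htl : pvTri ((k : Int) - 1) = pvTri (lo - 1) := by rw [hke]
          have hpl : pvPyr ((k : Int) - 1) = pvPyr (lo - 1) := by rw [hke]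
          rw [← htl, ← hpl, ← hke]
          linear_combination (b - a) * ht - hp
        · have hlt : lo < (k : Int) := lt_of_le_of_ne hlo (by omega)
          have h2 : min ((k : Int) - 1) (b - 1) = (k : Int) - 1 := by omega
          rw [h2, if_neg (by omega)]
          linear_combination (b - a) * ht - hp

-- A's loop, as init plus a mapped sum
lemma pvFoldlA (n m r : Int) : ∀ (l : List Int) (init : Int),
    l.foldl
      (fun total_pairs dx =>
        let dy := r - dx
        let valid_rows := max 0 (n - dy)
        let valid_columns := max 0 (m - dx)
        let total_pairs := total_pairs + valid_rows * valid_columns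
        if dx ≠ 0 ∧ dy ≠ 0 then total_pairs + valid_rows * valid_columns else total_pairs)
      init
    = init + (l.map (fun dx => pvV n m r dx + if dx ≠ 0 ∧ r - dx ≠ 0 then pvV n m r dx else 0)).sum := by
  intro l
  induction l with
  | nil => intro init; simp
  | cons x xs ih =>
    intro init
    simp only [List.foldl_cons, List.map_cons, List.sum_cons, ih]
    unfold pvV
    split_ifs <;> ring

lemma pvListFinsetSum (f : Nat → Int) : ∀ N : Nat, ((List.range N).map f).sum = ∑ i ∈ Finset.range N, f i := by
  intro N
  induction N with
  | zero => simp
  | succ N ih => rw [List.range_succ, List.map_append, List.sum_append, Finset.sum_range_succ, ih]; simp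

-- the doubled-interior sum: drop the two boundary terms once
lemma pvIteSum (v : Nat → Int) (r : Int) (N : Nat) (hN : (N : Int) = r + 1) (hr : 1 ≤ r) :
    (∑ i ∈ Finset.range N, (if (i : Int) ≠ 0 ∧ r - (i : Int) ≠ 0 then v i else 0))
      = (∑ i ∈ Finset.range N, v i) - v 0 - v (N - 1) := by
  have hN2 : 2 ≤ N := by omega
  have hstep : ∀ i ∈ Finset.range N,
      (if (i : Int) ≠ 0 ∧ r - (i : Int) ≠ 0 then v i else 0)
        = v i - (if i = 0 then v i else 0) - (if i = N - 1 then v i else 0) := by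
    intro i hi
    have hiN : i < N := Finset.mem_range.mp hi
    by_cases h0 : i = 0
    · subst h0
      rw [if_neg (by simp), if_pos rfl, if_neg (by omega)]
      ring
    · by_cases hl : i = N - 1
      · have : r - (i : Int) = 0 := by
          have : (i : Int) = (N : Int) - 1 := by omega
          omega
        rw [if_neg (by tauto), if_neg h0, if_pos hl]
        ring
      · have hc : (i : Int) ≠ 0 ∧ r - (i : Int) ≠ 0 := by
          constructor
          · exact_mod_cast h0
          · have : (i : Int) < (N : Int) - 1 := by omega
            omega
        rw [if_pos hc, if_neg h0, if_neg hl]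
        ring
  rw [Finset.sum_congr rfl hstep]
  rw [Finset.sum_sub_distrib, Finset.sum_sub_distrib, Finset.sum_ite_eq' (Finset.range N) 0 v,
      Finset.sum_ite_eq' (Finset.range N) (N - 1) v]
  rw [if_pos (Finset.mem_range.mpr (by omega)), if_pos (Finset.mem_range.mpr (by omega))]

-- ===== VERDICT (by name: the statement is the Claim_ definition above) =====
theorem count_manhattan_pairs_spec : Claim_equal_count_manhattan_pairs := by
  intro n m r _
  unfold Spec_count_manhattan_pairs count_manhattan_pairs count_manhattan_pairs_alt
  by_cases hr : r < 0
  · rw [PySem.List.pyRange_one_eq_nil (by omega), if_pos hr]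
    simp [PySem.Int.floordiv]
  · push_neg at hr
    rw [if_neg (by omega)]
    rw [pvFoldlA n m r]
    obtain ⟨N, hN⟩ : ∃ N : Nat, r + 1 = (N : Int) := ⟨(r + 1).toNat, by omega⟩
    rw [hN, PySem.List.pyRange_zero_natCast, List.map_map]
    have hmap : ((fun dx => pvV n m r dx + if dx ≠ 0 ∧ r - dx ≠ 0 then pvV n m r dx else 0) ∘ (fun i : Nat => (i : Int)))
        = fun i : Nat => pvV n m r (i : Int) + if (i : Int) ≠ 0 ∧ r - (i : Int) ≠ 0 then pvV n m r (i : Int) else 0 := rfl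
    rw [hmap, pvListFinsetSum, Finset.sum_add_distrib]
    have hV : ∀ i : Nat, pvV n m r (i : Int) = max 0 ((n - r) + (i : Int)) * max 0 (m - (i : Int)) := by
      intro i
      unfold pvV
      congr 2
      ring
    have hSv : (∑ i ∈ Finset.range N, pvV n m r (i : Int)) = pvSegG (n - r) m N := by
      rw [pvSegG_sum (n - r) m N, pvListFinsetSum]
      exact Finset.sum_congr rfl (fun i _ => hV i)
    have hGf : pvSegG (n - r) m N
        = (if min r (m - 1) < max 0 (1 - (n - r)) then 0
           else (n - r) * m * (min r (m - 1) - max 0 (1 - (n - r)) + 1)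
             + (m - (n - r)) * (pvTri (min r (m - 1)) - pvTri (max 0 (1 - (n - r)) - 1))
             - (pvPyr (min r (m - 1)) - pvPyr (max 0 (1 - (n - r)) - 1))) := by
      unfold pvSegG
      rw [show (N : Int) - 1 = r from by omega]
    by_cases hr0 : r = 0
    · subst hr0
      have hN1 : N = 1 := by omega
      subst hN1
      simp only [Finset.sum_range_one, Nat.cast_zero]
      rw [if_neg (by simp), add_zero, zero_add]
      rw [Finset.sum_range_one, Nat.cast_zero] at hSv
      rw [hSv, hGf]
      simp
    · simp only [if_neg hr0]
      have hr1 : 1 ≤ r := by omega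
      rw [pvIteSum (fun i => pvV n m r (i : Int)) r N (by omega) hr1]
      rw [hSv, ← hGf]
      have hv0 : pvV n m r ((0 : Nat) : Int) = max 0 (n - r) * max 0 m := by
        simp [pvV]
      have hvr : pvV n m r (((N - 1 : Nat)) : Int) = max 0 n * max 0 (m - r) := by
        unfold pvV
        have h1 : ((N - 1 : Nat) : Int) = r := by omega
        rw [h1]
        congr 2
        ring
      rw [hv0] at *
      rw [hvr]
      congr 1
      ring
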